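-- pv_equiv track=rewrite | github.com/dan12321/google-foobar | GoogleFooBarTask10/solution.py | solution
-- ===== SOURCE A (Python) =====
-- def solution(s):
--     n = int(s)
--     if (n == 1):
--         return 1
--     elif (n == 0):
--         return 0
--     else:
--         a = g(n)
--         b = f(a)
--         partA = int(a * (a + 1) // 2)
--         partB = b * (b + 1)
--         partC = int(solution(b))
--         return str(partA - partB - partC)
--
-- def f(a):
--     result = a - isqrt(100 * (a ** 2) // 2) // 10
--     if (isqrt(100 * (a ** 2) // 2) % 10):
--         result -= 1
--     return result
--
-- def g(n):
--     return isqrt(2 * n ** 2)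
--
-- def isqrt(n):
--     step = n // 2
--     while (True):
--         nextStep = takeStep(step, n)
--         if (step <= nextStep):
--             return step
--         else:
--             step = nextStep
--
-- def takeStep(x, n):
--     numerator = x ** 2 + n
--     denom = 2 * x
--     return numerator // denom
-- ===== SOURCE B (Python) =====
-- def solution(s):
--     n = int(s)
--     if n == 0 or n == 1:
--         return n
--     total = 0
--     sign = 1
--     while n != 0 and n != 1:
--         a = isqrt(2 * n * n)
--         q, r = divmod(isqrt(50 * a * a), 10)
--         b = a - q - (1 if r else 0)
--         total += sign * (a * (a + 1) // 2 - b * (b + 1))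
--         sign = -sign
--         n = b
--     return str(total + sign * n)
--
-- def isqrt(n):
--     # binary (base-4 digit-by-digit) integer square root
--     if n < 2:
--         return n
--     r = isqrt(n >> 2) << 1
--     return r + 1 if (r + 1) * (r + 1) <= n else r
-- ===== Notes on version B (the rewrite author's own statement) =====
-- stated objective: alternative
-- what changed: A's self-recursion with a Newton-iteration isqrt is replaced by an iterative alternating-sign accumulator loop whose square roots come from a base-4 digit-by-digit recursive isqrt, and f/g are inlined into the loop with divmod.
-- outside the precondition, e.g. on solution('1'): A returns 1, B returns 1; on solution('0'): A returns 0, B returns 0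
import Mathlib
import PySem

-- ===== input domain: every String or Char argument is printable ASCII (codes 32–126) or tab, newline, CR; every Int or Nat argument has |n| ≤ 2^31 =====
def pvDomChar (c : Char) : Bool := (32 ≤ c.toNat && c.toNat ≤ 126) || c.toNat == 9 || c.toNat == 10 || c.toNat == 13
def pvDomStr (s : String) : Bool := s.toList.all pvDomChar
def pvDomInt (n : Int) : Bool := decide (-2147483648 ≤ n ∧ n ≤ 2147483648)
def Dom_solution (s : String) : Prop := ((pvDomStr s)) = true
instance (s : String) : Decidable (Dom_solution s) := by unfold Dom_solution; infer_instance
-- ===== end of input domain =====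

-- B replaces A's recursion + Newton isqrt by an iterative alternating-sign accumulator
-- loop with a base-4 digit-by-digit recursive isqrt and f/g inlined via divmod.

-- ===== PORT A =====
-- A's helpers: takeStep, Newton isqrt (fueled loop; the fuel bound is never reached on
-- the arguments that occur inside Pre_), g, f.
def takeStep (x n : Int) : Int :=
  PySem.Int.floordiv (x ^ 2 + n) (2 * x)

def isqrtLoop : Nat → Int → Int → Int
  | 0, step, _ => step   -- fuel exhausted (never reached inside Pre_)
  | fuel + 1, step, n =>
    let nextStep := takeStep step n
    if step ≤ nextStep then step else isqrtLoop fuel nextStep n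

def isqrt (n : Int) : Int :=
  let step := PySem.Int.floordiv n 2
  isqrtLoop (step.natAbs + 1) step n

def g (n : Int) : Int := isqrt (2 * n ^ 2)

def f (a : Int) : Int :=
  let result := a - PySem.Int.floordiv (isqrt (PySem.Int.floordiv (100 * a ^ 2) 2)) 10
  if PySem.Int.mod (isqrt (PySem.Int.floordiv (100 * a ^ 2) 2)) 10 ≠ 0 then result - 1
  else result

-- A's recursion, fueled (the depth is logarithmic; fuel n.natAbs+1 is ample).
-- The int(str(x)) round-trip on the recursive call (partC = int(solution(b))) is the
-- identity on integers and is elided.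
def solA : Nat → Int → Int
  | 0, _ => 0   -- fuel exhausted (never reached inside Pre_)
  | fuel + 1, n =>
    if n = 1 then 1
    else if n = 0 then 0
    else
      let a := g n
      let b := f a
      let partA := PySem.Int.floordiv (a * (a + 1)) 2
      let partB := b * (b + 1)
      let partC := solA fuel b
      partA - partB - partC

def solution (s : String) : String :=
  match PySem.Int.ofStr? s with
  | none => ""   -- Python raises ValueError here (outside Pre_)
  | some n =>
    -- for n = 0 / 1 the Python returns the bare int (not a str; outside Pre_)
    if n = 1 then "1"
    else if n = 0 then "0"
    else PySem.Int.toStr (solA (n.natAbs + 1) n)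

-- ===== PORT B =====
-- Source B's binary isqrt: base-4 digit-by-digit recursion (n >> 2 is floor division by 4)
def bsqrt (n : Int) : Int :=
  if h : n < 2 then n
  else
    let r := bsqrt (PySem.Int.floordiv n 4) * 2
    if (r + 1) * (r + 1) ≤ n then r + 1 else r
termination_by n.toNat
decreasing_by
  have h2 : (2:Int) ≤ n := by omega
  have he := PySem.Int.floordiv_eq_ediv_of_pos (a := n) (b := 4) (by omega)
  have hdm := Int.ediv_add_emod n 4
  have hr0 : 0 ≤ n % 4 := Int.emod_nonneg n (by omega)
  have hr4 : n % 4 < 4 := Int.emod_lt_of_pos n (by omega)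
  omega

-- Source B's iterative loop: total/sign accumulator, g and f inlined (divmod), same fuel shape
def solBLoop : Nat → Int → Int → Int → Int
  | 0, _, _, total => total   -- fuel exhausted (never reached inside Pre_)
  | fuel + 1, n, sign, total =>
    if n = 0 ∨ n = 1 then total + sign * n
    else
      let a := bsqrt (2 * n * n)
      let q := PySem.Int.floordiv (bsqrt (50 * a * a)) 10
      let r := PySem.Int.mod (bsqrt (50 * a * a)) 10
      let b := a - q - (if r ≠ 0 then 1 else 0)
      solBLoop fuel b (-sign)
        (total + sign * (PySem.Int.floordiv (a * (a + 1)) 2 - b * (b + 1)))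

def solution_alt (s : String) : String :=
  match PySem.Int.ofStr? s with
  | none => ""   -- Python raises ValueError here (outside Pre_)
  | some n =>
    if n = 0 ∨ n = 1 then PySem.Int.toStr n   -- Source B returns the bare int here (outside Pre_)
    else PySem.Int.toStr (solBLoop (n.natAbs + 1) n 1 0)

-- ===== PRECONDITION & SPEC =====
-- Pre_ excludes strings that are not an int literal (A raises ValueError) and strings whose
-- value is 0 or 1, where A returns the bare Python int rather than a str (not a value of the
-- declared String type).
def Pre_solution (s : String) : Prop :=
  PySem.Int.ofStr? s ≠ none ∧
  (PySem.Int.ofStr? s).getD 0 ≠ 0 ∧ (PySem.Int.ofStr? s).getD 0 ≠ 1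
instance (s : String) : Decidable (Pre_solution s) := by unfold Pre_solution; infer_instance

def pvWitness_solution : String := "7"

def Spec_solution (s : String) (out : String) : Prop := out = solution_alt s
instance (s : String) (out : String) : Decidable (Spec_solution s out) := by unfold Spec_solution; infer_instance

-- ===== CLAIM (what is proved, stated in full; the proofs are below) =====
def Claim_equal_solution : Prop := ∀ (s : String), Dom_solution s → Pre_solution s → Spec_solution s (solution s)

-- ===== LEMMAS AND PROOFS =====

-- characterization of Nat.sqrt lifted to Int
theorem intSqrt_spec (n : Int) (hn : 0 ≤ n) :
    (Nat.sqrt n.toNat : Int) ^ 2 ≤ n ∧ n < ((Nat.sqrt n.toNat : Int) + 1) ^ 2 := by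
  have h1 := Nat.sqrt_le' n.toNat
  have h2 := Nat.lt_succ_sqrt' n.toNat
  have ht : (n.toNat : Int) = n := Int.toNat_of_nonneg hn
  constructor
  · rw [← ht]; exact_mod_cast h1
  · rw [← ht]; rw [Nat.succ_eq_add_one] at h2; exact_mod_cast h2

theorem intSqrt_unique (n a : Int) (ha : 0 ≤ a) (h1 : a ^ 2 ≤ n) (h2 : n < (a + 1) ^ 2) :
    (Nat.sqrt n.toNat : Int) = a := by
  have hn : 0 ≤ n := le_trans (by positivity) h1
  obtain ⟨hs1, hs2⟩ := intSqrt_spec n hn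
  set s := (Nat.sqrt n.toNat : Int) with hs
  have hs0 : 0 ≤ s := by positivity
  rcases lt_trichotomy s a with h | h | h
  · exfalso; nlinarith
  · exact h
  · exfalso; nlinarith

-- Newton's loop returns the integer square root
theorem isqrtLoop_eq (fuel : Nat) : ∀ step n r : Int, 2 ≤ n → 1 ≤ r →
    r ^ 2 ≤ n → n < (r + 1) ^ 2 → r ≤ step → step - r + 1 ≤ (fuel : Int) →
    isqrtLoop fuel step n = r := by
  induction fuel with
  | zero => intro step n r _ hr _ _ hle hfuel; exfalso; simp at hfuel; omega
  | succ fuel ih =>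
    intro step n r hn hr hr1 hr2 hle hfuel
    have hstep : 1 ≤ step := le_trans hr hle
    have hpos : (0:Int) < 2 * step := by omega
    simp only [isqrtLoop, takeStep]
    by_cases hc : step ≤ PySem.Int.floordiv (step ^ 2 + n) (2 * step)
    · -- returns step; show step = r
      simp only [hc, if_true]
      by_contra hne
      have hlt : r + 1 ≤ step := by omega
      have hgt : n < step ^ 2 := by nlinarith
      have : PySem.Int.floordiv (step ^ 2 + n) (2 * step) < step := by
        rw [PySem.Int.floordiv_lt_iff_lt_mul hpos]; nlinarith
      omega
    · simp only [hc, if_false]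
      have hnext : r ≤ PySem.Int.floordiv (step ^ 2 + n) (2 * step) := by
        rw [PySem.Int.le_floordiv_iff_mul_le hpos]; nlinarith [sq_nonneg (step - r)]
      exact ih _ n r hn hr hr1 hr2 hnext (by push_cast; push_cast at hfuel; omega)

theorem isqrt_eq (n : Int) (hn : 2 ≤ n) : isqrt n = (Nat.sqrt n.toNat : Int) := by
  obtain ⟨hs1, hs2⟩ := intSqrt_spec n (by omega)
  set r := (Nat.sqrt n.toNat : Int) with hrdef
  have hr0 : 0 ≤ r := by positivity
  have hr1 : 1 ≤ r := by nlinarith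
  unfold isqrt
  have hd : PySem.Int.floordiv n 2 = n / 2 := PySem.Int.floordiv_eq_ediv_of_pos (by omega)
  have hdm := Int.ediv_add_emod n 2
  have hm0 : 0 ≤ n % 2 := Int.emod_nonneg n (by omega)
  have hm2 : n % 2 < 2 := Int.emod_lt_of_pos n (by omega)
  have hstep1 : 1 ≤ n / 2 := by omega
  have hle : r ≤ n / 2 := by
    by_contra hc
    push_neg at hc
    have : n ≤ 2 * r - 1 := by omega
    nlinarith [sq_nonneg (r - 1)]
  rw [hd]
  have hna : ((n / 2).natAbs : Int) = n / 2 := Int.natAbs_of_nonneg (by omega)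
  exact isqrtLoop_eq _ _ _ _ hn hr1 hs1 hs2 hle (by omega)

-- the binary isqrt returns the integer square root
theorem bsqrt_eq (n : Int) (hn : 0 ≤ n) : bsqrt n = (Nat.sqrt n.toNat : Int) := by
  have main : ∀ (k : Nat) (n : Int), 0 ≤ n → n.toNat ≤ k → bsqrt n = (Nat.sqrt n.toNat : Int) := by
    intro k
    induction k with
    | zero =>
      intro n hn hk
      have : n = 0 := by omega
      subst this; rw [bsqrt]; norm_num
    | succ k ih =>
      intro n hn hk
      by_cases h2 : n < 2
      · have : n = 0 ∨ n = 1 := by omega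
        rcases this with h | h <;> subst h <;> rw [bsqrt] <;> norm_num
      · rw [bsqrt]
        simp only [h2, dite_false]
        have hd : PySem.Int.floordiv n 4 = n / 4 := PySem.Int.floordiv_eq_ediv_of_pos (by omega)
        have hdm := Int.ediv_add_emod n 4
        have hm0 : 0 ≤ n % 4 := Int.emod_nonneg n (by omega)
        have hm4 : n % 4 < 4 := Int.emod_lt_of_pos n (by omega)
        have hq0 : 0 ≤ n / 4 := by omega
        have hqlt : (n / 4).toNat ≤ k := by omega
        rw [hd, ih (n / 4) hq0 hqlt]
        obtain ⟨hs1, hs2⟩ := intSqrt_spec (n / 4) hq0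
        set s := (Nat.sqrt (n / 4).toNat : Int) with hsdef
        have hs0 : 0 ≤ s := by positivity
        by_cases hbr : (s * 2 + 1) * (s * 2 + 1) ≤ n
        · simp only [hbr, if_true]
          exact (intSqrt_unique n (s * 2 + 1) (by omega) (by nlinarith) (by nlinarith)).symm
        · simp only [hbr, if_false]
          push_neg at hbr
          exact (intSqrt_unique n (s * 2) (by omega) (by nlinarith) (by nlinarith)).symm
  exact main n.toNat n hn le_rfl

-- B's loop unfolds to A's recursion (the accumulator carries total + sign · solA fuel n),
-- with the inlined bsqrt-based g/f rewritten to A's Newton-based ones.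
-- B's inlined bsqrt-based g: equals A's Newton-based g on nonzero n
theorem bsqrt_eq_g (n : Int) (hn : n ≠ 0) : bsqrt (2 * n * n) = g n := by
  have h1n : 1 ≤ n ^ 2 := by rcases lt_or_gt_of_ne hn with h | h <;> nlinarith
  have h2 : (2:Int) ≤ 2 * n ^ 2 := by nlinarith
  rw [bsqrt_eq (2 * n * n) (by nlinarith), g, isqrt_eq (2 * n ^ 2) h2]
  norm_num [pow_two]; ring_nf

theorem g_pos (n : Int) (hn : n ≠ 0) : 1 ≤ g n := by
  have h1n : 1 ≤ n ^ 2 := by rcases lt_or_gt_of_ne hn with h | h <;> nlinarith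
  have h2 : (2:Int) ≤ 2 * n ^ 2 := by nlinarith
  rw [g, isqrt_eq (2 * n ^ 2) h2]
  obtain ⟨_, hs2⟩ := intSqrt_spec (2 * n ^ 2) (by omega)
  set s := (Nat.sqrt (2 * n ^ 2).toNat : Int)
  have : 0 ≤ s := by positivity
  nlinarith

-- B's inlined divmod-based f: equals A's f on positive a
theorem fB_eq_f (a : Int) (ha : 1 ≤ a) :
    a - PySem.Int.floordiv (bsqrt (50 * a * a)) 10 -
      (if PySem.Int.mod (bsqrt (50 * a * a)) 10 ≠ 0 then 1 else 0) = f a := by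
  have hhalf : PySem.Int.floordiv (100 * a ^ 2) 2 = 50 * a ^ 2 := by
    rw [PySem.Int.floordiv_eq_ediv_of_pos (by omega)]
    have : (100 : Int) * a ^ 2 = 2 * (50 * a ^ 2) := by ring
    rw [this, Int.mul_ediv_cancel_left _ (by omega)]
  have hb : bsqrt (50 * a * a) = isqrt (50 * a ^ 2) := by
    rw [bsqrt_eq (50 * a * a) (by nlinarith), isqrt_eq (50 * a ^ 2) (by nlinarith)]
    norm_num [pow_two]; ring_nf
  simp only [f]
  rw [hhalf, hb]
  split_ifs <;> ring

-- B's loop unfolds to A's recursion (the accumulator carries total + sign · solA fuel n),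
-- with the inlined bsqrt-based g/f rewritten to A's Newton-based ones.
theorem solBLoop_eq_solA (fuel : Nat) : ∀ (n sign total : Int),
    solBLoop fuel n sign total = total + sign * solA fuel n := by
  induction fuel with
  | zero => intro n sign total; simp [solBLoop, solA]
  | succ fuel ih =>
    intro n sign total
    by_cases h1 : n = 1
    · subst h1; simp [solBLoop, solA]
    · by_cases h0 : n = 0
      · subst h0; simp [solBLoop, solA]
      · have hn : ¬ (n = 0 ∨ n = 1) := by tauto
        simp only [solBLoop, solA]
        rw [if_neg hn, if_neg h1, if_neg h0]
        rw [bsqrt_eq_g n h0, fB_eq_f (g n) (g_pos n h0), ih]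
        ring

-- ===== VERDICT (by name: the statement is the Claim_ definition above) =====
theorem solution_spec : Claim_equal_solution := by
  intro s _ hpre
  obtain ⟨hsome, h0, h1⟩ := hpre
  unfold Spec_solution solution solution_alt
  cases hv : PySem.Int.ofStr? s with
  | none => exact absurd hv hsome
  | some n =>
    rw [hv] at h0 h1
    simp only [Option.getD_some] at h0 h1
    simp only [h0, h1, if_false, or_self_iff, solBLoop_eq_solA]
    ring_nf
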